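-- pv_equiv track=rewrite | github.com/Sofia-Petukhova/Task-3 | main.py | need_to_move
-- ===== SOURCE A (Python) =====
-- def is_cbs(lisp_reference: str) -> int:
--     """
--     Проверяет, является ли строка правильной скобочной последовательностью.
--
--     Возвращает:
--     1  — если строка является ПСП
--     0  — если строка НЕ является ПСП
--     -1 — если строка некорректна
--     """
--     if not isinstance(lisp_reference, str):
--         return -1
--
--     if len(lisp_reference) % 2 != 0:
--         return -1
--
--     if any(ch not in "()" for ch in lisp_reference):
--         return -1
--
--     balance = 0
--     for ch in lisp_reference:
--         balance += 1 if ch == "(" else -1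
--
--         if balance < 0:
--             return 0  # закрывающей скобки больше, чем открывающих
--
--     return 1 if balance == 0 else 0
--
-- def need_to_move(lisp_reference: str) -> int:
--     """
--     Возвращает минимальное количество перемещений одной скобки
--     в начало или конец строки, чтобы сделать её ПСП.
--
--     Возвращает -1, если строка некорректна.
--     """
--     if not isinstance(lisp_reference, str):
--         return -1
--
--     if len(lisp_reference) % 2 != 0:
--         return 0
--
--     if any(ch not in "()" for ch in lisp_reference):
--         return -1
--
--     if is_cbs(lisp_reference) == 1:
--         return 0
--
--     balance = 0
--     min_balance = 0
--
--     for ch in lisp_reference: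
--         balance += 1 if ch == "(" else -1
--         min_balance = min(min_balance, balance)
--
--     return -min_balance
-- ===== SOURCE B (Python) =====
-- def need_to_move(lisp_reference: str) -> int:
--     if not isinstance(lisp_reference, str):
--         return -1
--     if len(lisp_reference) % 2 != 0:
--         return 0
--     open_depth = 0
--     unmatched_close = 0
--     for ch in lisp_reference:
--         if ch == "(":
--             open_depth += 1
--         elif ch == ")":
--             if open_depth > 0:
--                 open_depth -= 1
--             else:
--                 unmatched_close += 1
--         else:
--             return -1
--     return unmatched_close
-- ===== Notes on version B (the rewrite author's own statement) =====
-- stated objective: simpler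
-- what changed: Replaced A's three passes (validity scan, is_cbs call, running-minimum balance scan) by one single pass maintaining a stack-depth counter and an unmatched-closer tally, returning the tally directly.
import Mathlib
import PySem

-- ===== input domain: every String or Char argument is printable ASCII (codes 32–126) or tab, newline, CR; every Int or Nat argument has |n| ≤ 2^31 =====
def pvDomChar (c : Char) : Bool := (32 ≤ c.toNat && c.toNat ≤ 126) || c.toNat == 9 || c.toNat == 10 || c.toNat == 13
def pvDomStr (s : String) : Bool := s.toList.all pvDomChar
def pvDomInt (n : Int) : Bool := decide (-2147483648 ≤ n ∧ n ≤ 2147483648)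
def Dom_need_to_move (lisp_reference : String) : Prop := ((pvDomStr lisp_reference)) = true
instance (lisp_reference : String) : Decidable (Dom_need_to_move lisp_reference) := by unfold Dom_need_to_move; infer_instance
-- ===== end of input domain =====

-- B folds A's three passes (char validity, is_cbs, running-minimum balance) into one
-- counting pass (stack depth + unmatched-closer tally); proved equal on all strings.


-- ===== PORT A =====
-- balance loop of is_cbs, with the early `return 0` when balance drops below 0
def cbsLoop : List Char → Int → Int
  | [], b => if b == 0 then 1 else 0
  | ch :: rest, b =>
    let b' := b + (if ch == '(' then 1 else -1)
    if b' < 0 then 0 else cbsLoop rest b'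

def is_cbs (lisp_reference : String) : Int :=
  if lisp_reference.toList.length % 2 ≠ 0 then -1
  else if lisp_reference.toList.any (fun ch => !(ch == '(' || ch == ')')) then -1
  else cbsLoop lisp_reference.toList 0

-- balance / min_balance loop of need_to_move
def ntmLoop : List Char → Int → Int → Int
  | [], _, minb => minb
  | ch :: rest, b, minb =>
    let b' := b + (if ch == '(' then 1 else -1)
    ntmLoop rest b' (min minb b')

def need_to_move (lisp_reference : String) : Int :=
  if lisp_reference.toList.length % 2 ≠ 0 then 0
  else if lisp_reference.toList.any (fun ch => !(ch == '(' || ch == ')')) then -1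
  else if is_cbs lisp_reference == 1 then 0
  else - ntmLoop lisp_reference.toList 0 0

-- ===== PORT B =====
-- single pass: open depth + unmatched-closer tally; -1 on the first invalid char
def altLoop : List Char → Int → Int → Int
  | [], _, uc => uc
  | ch :: rest, o, uc =>
    if ch == '(' then altLoop rest (o + 1) uc
    else if ch == ')' then
      if o > 0 then altLoop rest (o - 1) uc else altLoop rest o (uc + 1)
    else -1

def need_to_move_alt (lisp_reference : String) : Int :=
  if lisp_reference.toList.length % 2 ≠ 0 then 0
  else altLoop lisp_reference.toList 0 0

-- ===== PRECONDITION & SPEC =====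
def Spec_need_to_move (lisp_reference : String) (out : Int) : Prop := out = need_to_move_alt lisp_reference
instance (lisp_reference : String) (out : Int) : Decidable (Spec_need_to_move lisp_reference out) := by unfold Spec_need_to_move; infer_instance

-- ===== CLAIM (what is proved, stated in full; the proofs are below) =====
def Claim_equal_need_to_move : Prop := ∀ (lisp_reference : String), Dom_need_to_move lisp_reference → Spec_need_to_move lisp_reference (need_to_move lisp_reference)

-- ===== LEMMAS AND PROOFS =====

-- If some character is invalid, B's loop returns -1.
theorem altLoop_invalid : ∀ (l : List Char) (o uc : Int),
    (∃ ch ∈ l, ¬(ch = '(' ∨ ch = ')')) → altLoop l o uc = -1 := by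
  intro l
  induction l with
  | nil => intro o uc ⟨ch, h, _⟩; exact absurd h (List.not_mem_nil)
  | cons c t ih =>
    intro o uc ⟨ch, hmem, hbad⟩
    simp only [altLoop]
    rcases List.mem_cons.mp hmem with rfl | htail
    · have h1 : ¬(ch == '(') := by simpa using fun h => hbad (Or.inl h)
      have h2 : ¬(ch == ')') := by simpa using fun h => hbad (Or.inr h)
      simp [h1, h2]
    · by_cases h1 : c = '('
      · simp [h1]; exact ih _ _ ⟨ch, htail, hbad⟩
      · by_cases h2 : c = ')'
        · simp [h1, h2]
          split_ifs <;> exact ih _ _ ⟨ch, htail, hbad⟩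
        · simp [h1, h2]

-- Core invariant: on valid characters, B's (open, unmatched) state is
-- (b - minb, -minb) in terms of A's (balance, min_balance) state.
theorem alt_eq_neg_ntm : ∀ (l : List Char) (b minb : Int),
    (∀ ch ∈ l, ch = '(' ∨ ch = ')') → minb ≤ b → minb ≤ 0 →
    altLoop l (b - minb) (-minb) = - ntmLoop l b minb := by
  intro l
  induction l with
  | nil => intro b minb _ _ _; simp [altLoop, ntmLoop]
  | cons c t ih =>
    intro b minb hval hle hnp
    have hc := hval c (List.mem_cons_self ..)
    have hvt : ∀ ch ∈ t, ch = '(' ∨ ch = ')' :=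
      fun ch h => hval ch (List.mem_cons_of_mem _ h)
    simp only [altLoop, ntmLoop, beq_iff_eq]
    rcases hc with rfl | rfl
    · rw [if_pos rfl, if_pos rfl]
      have hmin : min minb (b + 1) = minb := by omega
      rw [hmin]
      have h1 : b - minb + 1 = (b + 1) - minb := by ring
      rw [h1]
      exact ih (b + 1) minb hvt (by omega) hnp
    · rw [if_neg (by decide : ¬(')' = '(')), if_neg (by decide : ¬(')' = '(')),
        if_pos rfl]
      by_cases hpos : b - minb > 0
      · rw [if_pos hpos]
        have hmin : min minb (b + -1) = minb := by omega
        rw [hmin]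
        have h1 : b - minb - 1 = (b + -1) - minb := by ring
        rw [h1]
        exact ih (b + -1) minb hvt (by omega) hnp
      · rw [if_neg hpos]
        have hmin : min minb (b + -1) = b + -1 := by omega
        rw [hmin]
        have h1 : b - minb = (b + -1) - (b + -1) := by omega
        have h2 : -minb + 1 = -(b + -1) := by omega
        rw [h1, h2]
        exact ih (b + -1) (b + -1) hvt (by omega) (by omega)

-- If the is_cbs balance loop returns 1, the min-balance loop (started at 0) stays 0.
theorem ntm_of_cbs : ∀ (l : List Char) (b : Int),
    cbsLoop l b = 1 → ntmLoop l b 0 = 0 := by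
  intro l
  induction l with
  | nil => intro b _; simp [ntmLoop]
  | cons c t ih =>
    intro b h
    simp only [cbsLoop, beq_iff_eq] at h
    simp only [ntmLoop, beq_iff_eq]
    by_cases hneg : (b + if c = '(' then (1 : Int) else -1) < 0
    · rw [if_pos hneg] at h
      exact absurd h (by decide)
    · rw [if_neg hneg] at h
      have hm : min 0 (b + if c = '(' then (1 : Int) else -1) = 0 := by
        by_cases hcc : c = '(' <;> simp only [hcc, if_pos rfl, if_neg] at hneg ⊢ <;> omega
      rw [hm]
      exact ih _ h

-- Bool `List.any` bridge for the invalid-character test.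
theorem any_invalid_iff (l : List Char) :
    (l.any (fun ch => !(ch == '(' || ch == ')')) = true) ↔
      ∃ ch ∈ l, ¬(ch = '(' ∨ ch = ')') := by
  simp [List.any_eq_true]

-- ===== VERDICT (by name: the statement is the Claim_ definition above) =====
theorem need_to_move_spec : Claim_equal_need_to_move := by
  intro s _
  unfold Spec_need_to_move need_to_move need_to_move_alt is_cbs
  by_cases hodd : s.toList.length % 2 ≠ 0
  · rw [if_pos hodd, if_pos hodd]
  · rw [if_neg hodd, if_neg hodd, if_neg hodd]
    by_cases hbad : s.toList.any (fun ch => !(ch == '(' || ch == ')')) = true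
    · rw [if_pos hbad]
      exact (altLoop_invalid _ 0 0 ((any_invalid_iff _).mp hbad)).symm
    · rw [if_neg hbad, if_neg hbad]
      have hval : ∀ ch ∈ s.toList, ch = '(' ∨ ch = ')' := by
        intro ch h
        by_contra hb
        exact hbad ((any_invalid_iff _).mpr ⟨ch, h, hb⟩)
      have key : altLoop s.toList 0 0 = - ntmLoop s.toList 0 0 := by
        have := alt_eq_neg_ntm s.toList 0 0 hval le_rfl le_rfl
        simpa using this
      by_cases hcbs : cbsLoop s.toList 0 = 1
      · simp only [hcbs, if_pos (by decide : ((1:Int) == 1) = true)]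
        rw [key, ntm_of_cbs _ _ hcbs]; simp
      · have : ¬(cbsLoop s.toList 0 == 1) = true := by simpa using hcbs
        simp only [if_neg this]
        exact key.symm
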